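-- pv_equiv track=rewrite | github.com/karl0653/ENGG1340-hello-world | ACC.py | wiseChoice
-- ===== SOURCE A (Python) =====
-- def dominate(hotels,A,B):
--     for i in range(len(hotels[A])):
--         if (hotels[A][i] > hotels[B][i]):
--             return False
--     for i in range(len(hotels[A])):
--         if (hotels[A][i] < hotels[B][i]):
--             return True
--         # else:
--     return False
--
-- def wiseChoice(hotels):
--     #To be implemented by you
--     result=[]
--     for i in hotels:
--         d=False
--         for j in hotels:
--             # Do something here to check if j dominates i
--             if(i!=j and dominate(hotels,j,i)):
--                 d=True
--                 break
--         if  not d: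
--             result.append(i)
--
--     return result
-- ===== SOURCE B (Python) =====
-- def _dominates(a, b):
--     return all(x <= y for x, y in zip(a, b)) and any(x < y for x, y in zip(a, b))
--
-- def wiseChoice(hotels):
--     frontier = []  # [(name, values)] of current non-dominated hotels, in input order
--     for name, vals in hotels.items():
--         if any(_dominates(fv, vals) for _, fv in frontier):
--             continue
--         frontier = [(fn, fv) for fn, fv in frontier if not _dominates(vals, fv)]
--         frontier.append((name, vals))
--     return [fn for fn, _ in frontier]
-- ===== Notes on version B (the rewrite author's own statement) =====
-- stated objective: faster
-- what changed: A rescans the whole dict for a dominator of every hotel (always n^2 dominate calls); B keeps a running Pareto frontier, checks each hotel only against the current frontier and prunes hotels the newcomer dominates, comparing value lists directly instead of re-looking keys up in the dict.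
-- outside the precondition, e.g. on wiseChoice({'h0': [1, 2], 'h1': [0, 0], 'h2': [0, 1, 1]}): A returns ['h1'], B returns ['h1']
import Mathlib
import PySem

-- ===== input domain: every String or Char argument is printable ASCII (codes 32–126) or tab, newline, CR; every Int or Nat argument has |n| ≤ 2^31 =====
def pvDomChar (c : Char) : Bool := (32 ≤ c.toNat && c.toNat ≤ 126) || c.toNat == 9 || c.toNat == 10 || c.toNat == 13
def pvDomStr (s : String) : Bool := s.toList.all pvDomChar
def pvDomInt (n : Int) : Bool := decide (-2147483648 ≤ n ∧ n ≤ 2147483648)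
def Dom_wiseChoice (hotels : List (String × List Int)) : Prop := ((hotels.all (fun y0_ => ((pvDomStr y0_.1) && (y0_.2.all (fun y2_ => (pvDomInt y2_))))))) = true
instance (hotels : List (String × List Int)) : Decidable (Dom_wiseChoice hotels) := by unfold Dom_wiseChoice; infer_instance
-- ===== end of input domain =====

-- B replaces A's rescan-everyone-per-hotel nested loop by a running Pareto frontier pruned as it is
-- built (alternative decomposition; same return value on Pre_).


-- ===== PORT A =====
-- hotels is a Python dict[str, list[int]]; under the type convention it is an association list and
-- a key lookup is the first match.  The keys A looks up always occur (they come from the dict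
-- itself), so the [] default of the lookup is unreachable.
def pvLookup (hotels : List (String × List Int)) (k : String) : List Int :=
  (List.lookup k hotels).getD []

-- literal port of dominate: two index loops with early return.  hotels[B][i] can raise IndexError
-- in Python when the value lists have different lengths; those inputs are outside Pre_wiseChoice,
-- so the 0 default of pyGetD never fires on an admitted input.
def dominate (hotels : List (String × List Int)) (A B : String) : Bool :=
  if (List.range (pvLookup hotels A).length).any (fun i =>
      decide (PySem.List.pyGetD (pvLookup hotels A) (i : Int) 0
        > PySem.List.pyGetD (pvLookup hotels B) (i : Int) 0)) then
    false
  else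
    (List.range (pvLookup hotels A).length).any (fun i =>
      decide (PySem.List.pyGetD (pvLookup hotels A) (i : Int) 0
        < PySem.List.pyGetD (pvLookup hotels B) (i : Int) 0))

def wiseChoice (hotels : List (String × List Int)) : List String :=
  hotels.foldl (fun result i =>
    if !(hotels.any (fun j => (i.1 != j.1) && dominate hotels j.1 i.1))
    then result ++ [i.1] else result) []

-- ===== PORT B =====
def pyDominates (a b : List Int) : Bool :=
  ((a.zip b).all fun p => decide (p.1 ≤ p.2)) && ((a.zip b).any fun p => decide (p.1 < p.2))

def wiseChoice_alt (hotels : List (String × List Int)) : List String :=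
  (hotels.foldl (fun frontier x =>
    if frontier.any (fun f => pyDominates f.2 x.2) then frontier
    else (frontier.filter fun f => !pyDominates x.2 f.2) ++ [x]) []).map (·.1)

-- ===== PRECONDITION & SPEC =====
-- Pre_ excludes (i) inputs holding a pair of hotels x, y where x's value list is longer than y's and
-- not larger anywhere on y's length — the pair on which A's dominate raises IndexError if it is
-- reached (whether it is reached depends on scan order), and (ii) duplicate keys, which a Python
-- dict cannot hold (the list is only the dict's Lean-side representation).
def Pre_wiseChoice (hotels : List (String × List Int)) : Prop :=
  (hotels.map Prod.fst).Nodup ∧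
  ∀ x ∈ hotels, ∀ y ∈ hotels,
    x.2.length ≤ y.2.length ∨ ((x.2.zip y.2).any fun p => decide (p.2 < p.1)) = true
instance (hotels : List (String × List Int)) : Decidable (Pre_wiseChoice hotels) := by
  unfold Pre_wiseChoice; infer_instance

def pvWitness_wiseChoice : (List (String × List Int)) :=
  [("a", [1, 2]), ("b", [2, 1]), ("c", [2, 2])]

def Spec_wiseChoice (hotels : List (String × List Int)) (out : List String) : Prop := out = wiseChoice_alt hotels
instance (hotels : List (String × List Int)) (out : List String) : Decidable (Spec_wiseChoice hotels out) := by unfold Spec_wiseChoice; infer_instance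

-- ===== CLAIM (what is proved, stated in full; the proofs are below) =====
def Claim_equal_wiseChoice : Prop := ∀ (hotels : List (String × List Int)), Dom_wiseChoice hotels → Pre_wiseChoice hotels → Spec_wiseChoice hotels (wiseChoice hotels)

-- ===== LEMMAS AND PROOFS =====

-- a hotel is kept iff nobody in the whole list dominates it
def pvKept (l : List (String × List Int)) (x : String × List Int) : Bool :=
  !(l.any fun j => pyDominates j.2 x.2)

-- whenever one hotel of l dominates another, its value list is no longer (holds under Pre_)
def pvGood (l : List (String × List Int)) : Prop :=
  ∀ x ∈ l, ∀ y ∈ l, pyDominates x.2 y.2 = true → x.2.length ≤ y.2.length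

theorem pvGood_of_pre (l : List (String × List Int))
    (h : ∀ x ∈ l, ∀ y ∈ l,
      x.2.length ≤ y.2.length ∨ ((x.2.zip y.2).any fun p => decide (p.2 < p.1)) = true) :
    pvGood l := by
  intro x hx y hy hdom
  rcases h x hx y hy with hle | hz
  · exact hle
  · obtain ⟨p, hp, hlt⟩ := List.any_eq_true.1 hz
    rw [pyDominates, Bool.and_eq_true] at hdom
    have := List.all_eq_true.1 hdom.1 p hp
    simp at this hlt
    omega

theorem pyDominates_irrefl (a : List Int) : pyDominates a a = false := by
  have h : ((a.zip a).any fun p => decide (p.1 < p.2)) = false := by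
    induction a with
    | nil => rfl
    | cons x t ih => simp [List.zip_cons_cons, ih]
  simp [pyDominates, h]

theorem pyDominates_iff (a b : List Int) (h : a.length ≤ b.length) :
    pyDominates a b = true ↔
      (∀ i (hi : i < a.length), a[i] ≤ b[i]'(lt_of_lt_of_le hi h)) ∧
      (∃ i, ∃ hi : i < a.length, a[i] < b[i]'(lt_of_lt_of_le hi h)) := by
  simp only [pyDominates, Bool.and_eq_true, List.all_eq_true, List.any_eq_true,
    List.mem_iff_getElem, List.length_zip, Nat.min_eq_left h]
  constructor
  · rintro ⟨h1, h2⟩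
    constructor
    · intro i hi
      have := h1 _ ⟨i, by omega, rfl⟩
      simpa [List.getElem_zip] using this
    · obtain ⟨p, ⟨i, hi, hp⟩, hlt⟩ := h2
      exact ⟨i, by omega, by subst hp; simpa [List.getElem_zip] using hlt⟩
  · rintro ⟨h1, h2⟩
    constructor
    · rintro p ⟨i, hi, rfl⟩
      simpa [List.getElem_zip] using h1 i (by omega)
    · obtain ⟨i, hi, hlt⟩ := h2
      exact ⟨_, ⟨i, by omega, rfl⟩, by simpa [List.getElem_zip] using hlt⟩

theorem pyDominates_trans (a b c : List Int) (hab : a.length ≤ b.length)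
    (hbc : b.length ≤ c.length) (h1 : pyDominates a b = true) (h2 : pyDominates b c = true) :
    pyDominates a c = true := by
  rw [pyDominates_iff a b hab] at h1
  rw [pyDominates_iff b c hbc] at h2
  rw [pyDominates_iff a c (hab.trans hbc)]
  obtain ⟨hle1, i, hi, hlt1⟩ := h1
  obtain ⟨hle2, -⟩ := h2
  refine ⟨fun j hj => le_trans (hle1 j hj) (hle2 j (by omega)), i, hi, ?_⟩
  exact lt_of_lt_of_le hlt1 (hle2 i (by omega))

theorem lookup_of_nodup (l : List (String × List Int)) (x : String × List Int)
    (hnd : (l.map Prod.fst).Nodup) (hx : x ∈ l) : List.lookup x.1 l = some x.2 := by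
  induction l with
  | nil => cases hx
  | cons p t ih =>
    simp only [List.map_cons, List.nodup_cons] at hnd
    rcases List.mem_cons.1 hx with rfl | hxt
    · simp [List.lookup]
    · have hne : (x.1 == p.1) = false := by
        refine beq_eq_false_iff_ne.2 fun he => hnd.1 ?_
        exact he ▸ List.mem_map.2 ⟨x, hxt, rfl⟩
      simp [List.lookup, hne, ih hnd.2 hxt]

theorem range_any_eq_zip_any (R : Int → Int → Bool) (a b : List Int) (h : a.length ≤ b.length) :
    ((List.range a.length).any fun i =>
        R (PySem.List.pyGetD a (i : Int) 0) (PySem.List.pyGetD b (i : Int) 0)) =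
      ((a.zip b).any fun p => R p.1 p.2) := by
  rcases Bool.eq_false_or_eq_true ((a.zip b).any fun p => R p.1 p.2) with hb | hb <;> rw [hb]
  swap
  · rw [Bool.eq_false_iff] at hb ⊢
    intro hc
    apply hb
    rw [List.any_eq_true] at hc ⊢
    obtain ⟨i, hi, hR⟩ := hc
    rw [List.mem_range] at hi
    refine ⟨(a[i], b[i]'(lt_of_lt_of_le hi h)), List.mem_iff_getElem.2 ⟨i, by simp [List.length_zip]; omega, List.getElem_zip⟩, ?_⟩
    simpa [PySem.List.pyGetD_natCast, List.getD_eq_getElem?_getD, List.getElem?_eq_getElem, hi, lt_of_lt_of_le hi h] using hR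
  · rw [List.any_eq_true] at hb ⊢
    obtain ⟨p, hp, hR⟩ := hb
    obtain ⟨i, hi, rfl⟩ := List.mem_iff_getElem.1 hp
    simp only [List.length_zip, Nat.min_eq_left h] at hi
    refine ⟨i, List.mem_range.2 (by omega), ?_⟩
    simpa [List.getElem_zip, PySem.List.pyGetD_natCast, List.getD_eq_getElem?_getD,
      List.getElem?_eq_getElem, hi, lt_of_lt_of_le hi h] using hR

-- A's dominate, applied to keys of the dict, is B's value-level predicate
theorem dominate_eq (hotels : List (String × List Int)) (j x : String × List Int)
    (hnd : (hotels.map Prod.fst).Nodup) (hj : j ∈ hotels) (hx : x ∈ hotels)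
    (hcond : j.2.length ≤ x.2.length ∨
      ((j.2.zip x.2).any fun p => decide (p.2 < p.1)) = true) :
    dominate hotels j.1 x.1 = pyDominates j.2 x.2 := by
  have lj : pvLookup hotels j.1 = j.2 := by simp [pvLookup, lookup_of_nodup hotels j hnd hj]
  have lx : pvLookup hotels x.1 = x.2 := by simp [pvLookup, lookup_of_nodup hotels x hnd hx]
  rcases hcond with hle | hz
  · unfold dominate
    rw [lj, lx]
    rw [range_any_eq_zip_any (fun u v => decide (u > v)) j.2 x.2 hle,
      range_any_eq_zip_any (fun u v => decide (u < v)) j.2 x.2 hle]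
    have hall : ((j.2.zip x.2).all fun p => decide (p.1 ≤ p.2)) =
        !((j.2.zip x.2).any fun p => decide (p.1 > p.2)) := by
      rw [List.all_eq_not_any_not]
      congr 1
      exact List.any_congr rfl fun p => by rw [← decide_not]; simp [not_le]
    rcases Bool.eq_false_or_eq_true ((j.2.zip x.2).any fun p => decide (p.1 > p.2)) with hc | hc <;>
      simp [pyDominates, hc, hall]
  · -- j's list is somewhere strictly larger on the common prefix: both sides say "no"
    obtain ⟨p, hp, hlt⟩ := List.any_eq_true.1 hz
    obtain ⟨k, hk, hpk⟩ := List.mem_iff_getElem.1 hp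
    rw [List.length_zip] at hk
    have hkj : k < j.2.length := lt_of_lt_of_le hk (Nat.min_le_left _ _)
    have hkx : k < x.2.length := lt_of_lt_of_le hk (Nat.min_le_right _ _)
    have hgt : x.2[k] < j.2[k] := by
      rw [← hpk] at hlt
      simpa [List.getElem_zip] using hlt
    have hCt : ((List.range j.2.length).any fun i =>
        decide (PySem.List.pyGetD j.2 (i : Int) 0 > PySem.List.pyGetD x.2 (i : Int) 0)) = true := by
      refine List.any_eq_true.2 ⟨k, List.mem_range.2 hkj, ?_⟩
      simpa [PySem.List.pyGetD_natCast, List.getD_eq_getElem?_getD,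
        List.getElem?_eq_getElem, hkj, hkx] using hgt
    have hpd : pyDominates j.2 x.2 = false := by
      rw [Bool.eq_false_iff]
      intro hd
      rw [pyDominates, Bool.and_eq_true] at hd
      have hle' := List.all_eq_true.1 hd.1 _ hp
      rw [← hpk] at hle'
      simp [List.getElem_zip] at hle'
      omega
    unfold dominate
    rw [lj, lx, if_pos hCt, hpd]

-- characterisation of A: keep exactly the hotels nobody dominates, in order
theorem wiseChoice_char (hotels : List (String × List Int)) (hpre : Pre_wiseChoice hotels) :
    wiseChoice hotels = (hotels.filter (pvKept hotels)).map Prod.fst := by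
  obtain ⟨hnd, hpre2⟩ := hpre
  unfold wiseChoice
  rw [PySem.List.foldl_append_if
    (fun i => !(hotels.any (fun j => (i.1 != j.1) && dominate hotels j.1 i.1)))
    Prod.fst hotels [], List.nil_append]
  congr 1
  apply List.filter_congr
  intro x hx
  unfold pvKept
  congr 1
  rw [Bool.eq_iff_iff, List.any_eq_true, List.any_eq_true]
  constructor
  · rintro ⟨j, hj, hcond⟩
    rw [Bool.and_eq_true, bne_iff_ne] at hcond
    exact ⟨j, hj, by rw [← dominate_eq hotels j x hnd hj hx (hpre2 j hj x hx)]; exact hcond.2⟩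
  · rintro ⟨j, hj, hdom⟩
    refine ⟨j, hj, ?_⟩
    rw [Bool.and_eq_true, bne_iff_ne]
    have hne : x.1 ≠ j.1 := by
      intro he
      have hxe : x = j := List.inj_on_of_nodup_map hnd hx hj he
      rw [hxe, pyDominates_irrefl] at hdom
      cases hdom
    exact ⟨hne, by rw [dominate_eq hotels j x hnd hj hx (hpre2 j hj x hx)]; exact hdom⟩

theorem countP_lt_of (l : List (String × List Int)) (p q : (String × List Int) → Bool)
    (h : ∀ a ∈ l, p a = true → q a = true) (j : String × List Int) (hj : j ∈ l)
    (hq : q j = true) (hp : p j = false) : l.countP p < l.countP q := by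
  induction l with
  | nil => cases hj
  | cons a t ih =>
    rw [List.countP_cons, List.countP_cons]
    rcases List.mem_cons.1 hj with rfl | hjt
    · have hle : t.countP p ≤ t.countP q :=
        List.countP_mono_left (fun x hx => h x (List.mem_cons_of_mem _ hx))
      simp [hp, hq]; omega
    · have hlt : t.countP p < t.countP q :=
        ih (fun x hx => h x (List.mem_cons_of_mem _ hx)) hjt
      have hcmp : (if p a then 1 else 0) ≤ (if q a then 1 else 0) := by
        by_cases hpa : p a = true
        · simp [hpa, h a (List.mem_cons_self) hpa]
        · rw [Bool.not_eq_true] at hpa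
          simp only [hpa, Bool.false_eq_true, if_false]
          split <;> omega
      omega

-- any dominated value has a dominator among the non-dominated hotels
theorem rep_lemma (l : List (String × List Int)) (hgood : pvGood l) :
    ∀ n (v : List Int), (∀ j ∈ l, pyDominates j.2 v = true → j.2.length ≤ v.length) →
      l.countP (fun j => pyDominates j.2 v) = n →
      (l.any fun j => pyDominates j.2 v) = true →
      ∃ f, f ∈ l.filter (pvKept l) ∧ pyDominates f.2 v = true := by
  intro n
  induction n using Nat.strong_induction_on with
  | _ n ih =>
    intro v hv hcount hany
    obtain ⟨j, hj, hdom⟩ := List.any_eq_true.1 hany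
    by_cases hk : pvKept l j = true
    · exact ⟨j, List.mem_filter.2 ⟨hj, hk⟩, hdom⟩
    · have hj_any : (l.any fun k => pyDominates k.2 j.2) = true := by
        unfold pvKept at hk
        simpa using hk
      have hmono : ∀ a ∈ l, pyDominates a.2 j.2 = true → pyDominates a.2 v = true := by
        intro a ha hdja
        exact pyDominates_trans a.2 j.2 v (hgood a ha j hj hdja) (hv j hj hdom) hdja hdom
      have hlt : l.countP (fun k => pyDominates k.2 j.2) < n := by
        rw [← hcount]
        exact countP_lt_of l _ _ hmono j hj hdom (pyDominates_irrefl j.2)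
      obtain ⟨f, hf, hfd⟩ := ih _ hlt j.2 (fun k hk' hd => hgood k hk' j hj hd) rfl hj_any
      exact ⟨f, hf, pyDominates_trans f.2 j.2 v
        (hgood f (List.mem_filter.1 hf).1 j hj hfd) (hv j hj hdom) hfd hdom⟩

-- one step of B's frontier loop, seen on the filter characterisation
theorem step_eq (d : List (String × List Int)) (x : String × List Int)
    (hgood : pvGood (d ++ [x])) :
    (if (d.filter (pvKept d)).any (fun f => pyDominates f.2 x.2) then d.filter (pvKept d)
     else ((d.filter (pvKept d)).filter fun f => !pyDominates x.2 f.2) ++ [x]) =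
      (d ++ [x]).filter (pvKept (d ++ [x])) := by
  have hxm : x ∈ d ++ [x] := List.mem_append_right _ (List.mem_singleton.2 rfl)
  have hdm : ∀ y ∈ d, y ∈ d ++ [x] := fun y hy => List.mem_append_left _ hy
  have hkept' : ∀ y, pvKept (d ++ [x]) y = (!pyDominates x.2 y.2 && pvKept d y) := by
    intro y
    unfold pvKept
    simp [List.any_append, Bool.and_comm]
  rw [List.filter_append]
  by_cases hc : (d.filter (pvKept d)).any (fun f => pyDominates f.2 x.2) = true
  · obtain ⟨f, hf, hfd⟩ := List.any_eq_true.1 hc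
    obtain ⟨hfd_mem, hfk⟩ := List.mem_filter.1 hf
    -- x is dominated: it is dropped, and nothing already kept is dominated by x
    have hx_not : pvKept (d ++ [x]) x = false := by
      have hany : ((d ++ [x]).any fun j => pyDominates j.2 x.2) = true :=
        List.any_eq_true.2 ⟨f, hdm f hfd_mem, hfd⟩
      simp [pvKept, hany]
    have hsame : ∀ y ∈ d, pvKept (d ++ [x]) y = pvKept d y := by
      intro y hy
      rw [hkept' y]
      by_cases hky : pvKept d y = true
      · have hnd2 : pyDominates x.2 y.2 = false := by
          by_contra hcon
          rw [Bool.not_eq_false] at hcon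
          have : pyDominates f.2 y.2 = true :=
            pyDominates_trans f.2 x.2 y.2 (hgood f (hdm f hfd_mem) x hxm hfd)
              (hgood x hxm y (hdm y hy) hcon) hfd hcon
          unfold pvKept at hky
          rw [Bool.not_eq_true'] at hky
          rw [List.any_eq_true.2 ⟨f, hfd_mem, this⟩] at hky
          cases hky
        simp [hky, hnd2]
      · rw [Bool.not_eq_true] at hky
        simp [hky]
    rw [hc, List.filter_congr hsame]
    simp [List.filter, hx_not]
  · -- x is not dominated by anyone processed so far
    rw [Bool.not_eq_true] at hc
    have hnoany : (d.any fun j => pyDominates j.2 x.2) = false := by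
      by_contra hcon
      rw [Bool.not_eq_false] at hcon
      obtain ⟨f, hf, hfd⟩ := rep_lemma d
        (fun a ha b hb hd => hgood a (hdm a ha) b (hdm b hb) hd)
        (d.countP (fun j => pyDominates j.2 x.2)) x.2
        (fun j hj hd => hgood j (hdm j hj) x hxm hd) rfl hcon
      rw [List.any_eq_true.2 ⟨f, hf, hfd⟩] at hc
      cases hc
    have hx_kept : pvKept (d ++ [x]) x = true := by
      unfold pvKept
      simp [List.any_append, hnoany, pyDominates_irrefl]
    rw [hc]
    have : d.filter (pvKept (d ++ [x])) =
        (d.filter (pvKept d)).filter fun f => !pyDominates x.2 f.2 := by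
      rw [List.filter_filter]
      exact List.filter_congr fun y _ => hkept' y
    rw [this]
    simp [List.filter, hx_kept]

theorem pvGood_append (d : List (String × List Int)) (x : String × List Int)
    (h : pvGood (d ++ [x])) : pvGood d := fun a ha b hb hd =>
  h a (List.mem_append_left _ ha) b (List.mem_append_left _ hb) hd

-- B's frontier after processing l is exactly the skyline filter of l
theorem frontier_char (l : List (String × List Int)) (hgood : pvGood l) :
    l.foldl (fun frontier x =>
      if frontier.any (fun f => pyDominates f.2 x.2) then frontier
      else (frontier.filter fun f => !pyDominates x.2 f.2) ++ [x]) [] =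
      l.filter (pvKept l) := by
  induction l using List.reverseRecOn with
  | nil => rfl
  | append_singleton d x ih =>
    rw [List.foldl_append, List.foldl_cons, List.foldl_nil,
      ih (pvGood_append d x hgood)]
    exact step_eq d x hgood

-- ===== VERDICT (by name: the statement is the Claim_ definition above) =====
theorem wiseChoice_spec : Claim_equal_wiseChoice := by
  intro hotels _ hpre
  unfold Spec_wiseChoice wiseChoice_alt
  rw [wiseChoice_char hotels hpre, frontier_char hotels (pvGood_of_pre hotels hpre.2)]
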